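-- pv_equiv track=rewrite | github.com/hchiam/cogLang-geneticAlgo | geneticAlgo_just1.py | encourage_LettersFromEachSource
-- ===== SOURCE A (Python) =====
-- def encourage_LettersFromEachSource(word,originalWords):
--     score = 0
--     lettersAlreadyUsed = []
--     for letter in word:
--         # avoid using the same letter again anywhere in the same word:
--         if letter not in lettersAlreadyUsed:
--             lettersAlreadyUsed.append(letter)
--             # encourage using words with letters found in all source words:
--             for srcWord in originalWords:
--                 score += 1 if letter in srcWord else 0
--     return score
-- ===== SOURCE B (Python) =====
-- def encourage_LettersFromEachSource(word, originalWords):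
--     # Build an inverted index once: for each letter, how many source words contain it.
--     letterCounts = {}
--     for srcWord in originalWords:
--         for letter in set(srcWord):
--             letterCounts[letter] = letterCounts.get(letter, 0) + 1
--     # Sum the counts over the distinct letters of word.
--     total = 0
--     for letter in set(word):
--         total += letterCounts.get(letter, 0)
--     return total
-- ===== Notes on version B (the rewrite author's own statement) =====
-- stated objective: alternative
-- what changed: A's nested per-letter scan of every source word is replaced by one pass that builds an inverted index (letter -> number of source words containing it) and a second pass that sums the index over the distinct letters of word.
import Mathlib
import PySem

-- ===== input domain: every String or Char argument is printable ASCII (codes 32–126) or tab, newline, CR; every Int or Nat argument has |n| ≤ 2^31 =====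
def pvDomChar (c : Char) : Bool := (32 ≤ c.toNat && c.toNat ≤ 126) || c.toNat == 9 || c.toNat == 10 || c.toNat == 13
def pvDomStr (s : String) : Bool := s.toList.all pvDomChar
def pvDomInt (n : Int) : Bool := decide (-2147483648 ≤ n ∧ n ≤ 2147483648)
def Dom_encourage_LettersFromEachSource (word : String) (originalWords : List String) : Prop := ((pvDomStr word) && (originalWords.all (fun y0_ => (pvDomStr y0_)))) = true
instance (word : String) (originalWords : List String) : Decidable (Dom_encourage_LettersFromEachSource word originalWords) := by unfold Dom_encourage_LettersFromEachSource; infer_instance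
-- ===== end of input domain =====

-- B replaces A's nested membership scans with an inverted index (letter -> number of source words containing it) built in one pass, then a lookup pass over the distinct letters of word.

-- ===== PORT A =====
-- state = (score, lettersAlreadyUsed); inner loop over originalWords adds 1 when the letter occurs in srcWord
def encourage_LettersFromEachSource (word : String) (originalWords : List String) : Int :=
  (word.toList.foldl
    (fun (st : Int × List Char) letter =>
      if letter ∈ st.2 then st
      else
        (originalWords.foldl
          (fun s srcWord => s + (if PySem.Chars.isIn [letter] srcWord.toList then 1 else 0)) st.1,
         st.2 ++ [letter]))
    (0, [])).1

-- ===== PORT B =====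
def encourage_LettersFromEachSource_alt (word : String) (originalWords : List String) : Int :=
  let letterCounts : PySem.Dict Char Int :=
    originalWords.foldl
      (fun d srcWord =>
        (PySem.Set.ofList srcWord.toList).foldl (fun d letter => d.modify letter 0 (· + 1)) d)
      PySem.Dict.empty
  (PySem.Set.ofList word.toList).foldl (fun total letter => total + letterCounts.getD letter 0) 0

-- ===== PRECONDITION & SPEC =====
def Spec_encourage_LettersFromEachSource (word : String) (originalWords : List String) (out : Int) : Prop := out = encourage_LettersFromEachSource_alt word originalWords
instance (word : String) (originalWords : List String) (out : Int) : Decidable (Spec_encourage_LettersFromEachSource word originalWords out) := by unfold Spec_encourage_LettersFromEachSource; infer_instance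

-- ===== CLAIM (what is proved, stated in full; the proofs are below) =====
def Claim_equal_encourage_LettersFromEachSource : Prop := ∀ (word : String) (originalWords : List String), Dom_encourage_LettersFromEachSource word originalWords → Spec_encourage_LettersFromEachSource word originalWords (encourage_LettersFromEachSource word originalWords)

-- ===== LEMMAS AND PROOFS =====

-- number of source words containing letter c
def pvCnt (originalWords : List String) (c : Char) : Int :=
  (originalWords.map (fun srcWord => if c ∈ srcWord.toList then (1 : Int) else 0)).sum

lemma pvIsIn_single (c : Char) (l : List Char) :
    PySem.Chars.isIn [c] l = decide (c ∈ l) := by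
  by_cases h : c ∈ l
  · simp only [h, decide_true]
    rw [PySem.Chars.isIn_iff_infix]
    obtain ⟨a, b, rfl⟩ := List.append_of_mem h
    exact ⟨a, b, by simp⟩
  · simp only [h, decide_false]
    rw [PySem.Chars.isIn_eq_false_iff]
    intro hinf
    exact h (hinf.subset (by simp))

lemma pvA_inner (originalWords : List String) (c : Char) (s : Int) :
    originalWords.foldl (fun s srcWord => s + (if PySem.Chars.isIn [c] srcWord.toList then 1 else 0)) s
      = s + pvCnt originalWords c := by
  rw [PySem.List.foldl_add]
  unfold pvCnt
  congr 1
  refine congrArg (List.sum : List Int → Int) (List.map_congr_left ?_)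
  intro w _
  rw [pvIsIn_single]
  by_cases h : c ∈ w.toList <;> simp [h]

lemma pvDict_getD (originalWords : List String) (c : Char) :
    ∀ d : PySem.Dict Char Int,
      (originalWords.foldl
        (fun d srcWord => (PySem.Set.ofList srcWord.toList).foldl (fun d letter => d.modify letter 0 (· + 1)) d)
        d).getD c 0
      = d.getD c 0 + pvCnt originalWords c := by
  induction originalWords with
  | nil => intro d; simp [pvCnt]
  | cons w ws ih =>
    intro d
    simp only [List.foldl_cons, ih, PySem.Dict.getD_foldl_modify_add_one]
    have hcount : ((PySem.Set.ofList w.toList).count c : Int) = (if c ∈ w.toList then (1 : Int) else 0) := by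
      by_cases h : c ∈ w.toList
      · have : c ∈ PySem.Set.ofList w.toList := (PySem.Set.mem_ofList _ _).2 h
        rw [List.count_eq_one_of_mem (PySem.Set.nodup_ofList w.toList) this]
        simp [h]
      · have : c ∉ PySem.Set.ofList w.toList := fun hm => h ((PySem.Set.mem_ofList _ _).1 hm)
        rw [List.count_eq_zero_of_not_mem this]
        simp [h]
    simp [pvCnt, hcount]
    ring

-- the new distinct letters of cs relative to already-used u, in first-occurrence order
def pvNewDistinct (u : List Char) : List Char → List Char
  | [] => []
  | c :: cs => if c ∈ u then pvNewDistinct u cs else c :: pvNewDistinct (u ++ [c]) cs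

lemma pvA_fold (originalWords : List String) :
    ∀ (cs : List Char) (s : Int) (u : List Char),
      (cs.foldl
        (fun (st : Int × List Char) letter =>
          if letter ∈ st.2 then st
          else
            (originalWords.foldl
              (fun s srcWord => s + (if PySem.Chars.isIn [letter] srcWord.toList then 1 else 0)) st.1,
             st.2 ++ [letter]))
        (s, u)).1
      = s + ((pvNewDistinct u cs).map (pvCnt originalWords)).sum := by
  intro cs
  induction cs with
  | nil => intro s u; simp [pvNewDistinct]
  | cons c cs ih =>
    intro s u
    by_cases h : c ∈ u
    · simp [pvNewDistinct, h, ih]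
    · simp only [pvNewDistinct, h, List.foldl_cons, if_false]
      rw [ih, pvA_inner]
      simp
      ring

lemma pvNewDistinct_eq_update (cs : List Char) :
    ∀ u : List Char, u ++ pvNewDistinct u cs = PySem.Set.update u cs := by
  induction cs with
  | nil => intro u; simp [pvNewDistinct, PySem.Set.update_nil]
  | cons c cs ih =>
    intro u
    rw [PySem.Set.update_cons]
    by_cases h : c ∈ u
    · simp only [pvNewDistinct, h, if_true]
      rw [PySem.Set.add_of_mem h, ih]
    · simp only [pvNewDistinct, h, if_false]
      rw [PySem.Set.add_of_not_mem h, ← ih (u ++ [c])]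
      simp

lemma pvNewDistinct_nil (cs : List Char) : pvNewDistinct [] cs = PySem.Set.ofList cs := by
  have := pvNewDistinct_eq_update cs []
  simpa [PySem.Set.update_nil_left] using this

-- ===== VERDICT (by name: the statement is the Claim_ definition above) =====
theorem encourage_LettersFromEachSource_spec : Claim_equal_encourage_LettersFromEachSource := by
  intro word originalWords _
  unfold Spec_encourage_LettersFromEachSource
  unfold encourage_LettersFromEachSource encourage_LettersFromEachSource_alt
  rw [pvA_fold, pvNewDistinct_nil, PySem.List.foldl_add]
  simp only [zero_add]
  refine congrArg (List.sum : List Int → Int) (List.map_congr_left ?_)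
  intro c _
  rw [pvDict_getD]
  simp
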